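-- pv_equiv track=rewrite | github.com/ninamarq/trybe-projetos | ciencia-computacao/restaurant-orders/src/analyze_log.py | days_off
-- ===== SOURCE A (Python) =====
-- def opened_days(request):
--     return list(set([line[2] for line in request]))
--
-- def days_on(customer, request):
--     return list(set([
--         line[2] for line in request
--         if customer in line
--     ]))
--
-- def days_off(customer, requests):
--     days_open = set(opened_days(requests))
--     days_frequented = set(days_on(customer, requests))
--     response = []
--
--     for day in days_open:
--         if day not in days_frequented:
--             response.append(day)
--
--     return set(response)
-- ===== SOURCE B (Python) =====
-- def days_off(customer, requests):
--     # per-day visited flag: one dict keyed by day, True once any of the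
--     # customer's lines hit that day; the answer is the days whose flag stays False
--     visited = {}
--     for line in requests:
--         day = line[2]
--         visited[day] = (customer in line) or visited.get(day, False)
--     return {day for day, seen in visited.items() if not seen}
-- ===== Notes on version B (the rewrite author's own statement) =====
-- stated objective: alternative
-- what changed: Instead of building two sets (all days, frequented days) and subtracting them, B groups by day in a single dict mapping each day to a visited flag, and returns the days whose flag stayed False.
import Mathlib
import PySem

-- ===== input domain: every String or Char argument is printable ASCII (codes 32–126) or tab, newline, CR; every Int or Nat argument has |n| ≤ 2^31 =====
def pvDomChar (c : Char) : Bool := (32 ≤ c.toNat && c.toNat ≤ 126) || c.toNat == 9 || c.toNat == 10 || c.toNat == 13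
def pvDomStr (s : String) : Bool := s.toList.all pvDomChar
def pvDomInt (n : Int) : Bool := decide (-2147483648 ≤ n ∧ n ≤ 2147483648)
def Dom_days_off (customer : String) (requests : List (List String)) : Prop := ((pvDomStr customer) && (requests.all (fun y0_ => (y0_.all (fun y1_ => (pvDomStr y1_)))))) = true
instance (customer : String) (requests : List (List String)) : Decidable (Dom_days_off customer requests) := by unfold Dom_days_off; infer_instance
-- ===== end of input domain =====

-- B replaces A's two sets (all days / frequented days) and their difference by a single
-- dict mapping each day to a visited flag, returning the days whose flag stayed False (alternative).


-- ===== PORT A =====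
-- line[2]; exact under Pre_days_off (every row has length ≥ 3)
def pvGet2 (line : List String) : String := (PySem.List.pyGet? line 2).getD ""

def opened_days (request : List (List String)) : List String :=
  PySem.Set.ofList (request.map (fun line => pvGet2 line))

def days_on (customer : String) (request : List (List String)) : List String :=
  PySem.Set.ofList ((request.filter (fun line => line.contains customer)).map (fun line => pvGet2 line))

def days_off (customer : String) (requests : List (List String)) : List String :=
  let days_open : PySem.Set String := PySem.Set.ofList (opened_days requests)
  let days_frequented : PySem.Set String := PySem.Set.ofList (days_on customer requests)
  let response : List String :=
    days_open.foldl (fun r day => if !(PySem.Set.contains days_frequented day) then r ++ [day] else r) []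
  PySem.Set.ofList response

-- ===== PORT B =====
def days_off_alt (customer : String) (requests : List (List String)) : List String :=
  let visited : PySem.Dict String Bool :=
    requests.foldl
      (fun d line =>
        d.insert (pvGet2 line) (line.contains customer || d.getD (pvGet2 line) false))
      PySem.Dict.empty
  PySem.Set.ofList ((visited.items.filter (fun p => !p.2)).map (fun p => p.1))

-- ===== PRECONDITION & SPEC =====
-- Pre_ excludes exactly the inputs on which A raises IndexError: a row with fewer than 3 cells.
def Pre_days_off (customer : String) (requests : List (List String)) : Prop :=
  ∀ line ∈ requests, 3 ≤ line.length
instance (customer : String) (requests : List (List String)) : Decidable (Pre_days_off customer requests) := by unfold Pre_days_off; infer_instance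

def pvWitness_days_off : String × List (List String) :=
  ("ana", [["1", "pizza", "mon"], ["ana", "soda", "tue"], ["ana", "pizza", "mon"]])

def Spec_days_off (customer : String) (requests : List (List String)) (out : List String) : Prop := out = days_off_alt customer requests
instance (customer : String) (requests : List (List String)) (out : List String) : Decidable (Spec_days_off customer requests out) := by unfold Spec_days_off; infer_instance

-- ===== CLAIM (what is proved, stated in full; the proofs are below) =====
def Claim_equal_days_off : Prop := ∀ (customer : String) (requests : List (List String)), Dom_days_off customer requests → Pre_days_off customer requests → Spec_days_off customer requests (days_off customer requests)

-- ===== LEMMAS AND PROOFS =====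

-- elements selected by the filter are a sub-collection of all mapped elements
theorem freq_subset {A B : Type} (p : A → Bool) (k : A → B) (rs : List A) (day : B)
    (h : day ∈ (rs.filter p).map k) : day ∈ rs.map k := by
  rcases List.mem_map.1 h with ⟨x, hx, rfl⟩
  exact List.mem_map_of_mem (List.mem_of_mem_filter hx)

-- the dict B builds: keys = the distinct k-images in order, value = "some p-selected element maps there"
theorem grouping {A B : Type} [BEq B] [LawfulBEq B] (p : A → Bool) (k : A → B) (rs : List A) :
    (rs.foldl
      (fun (d : PySem.Dict B Bool) x => d.insert (k x) (p x || d.getD (k x) false))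
      PySem.Dict.empty).items
    = (PySem.Set.ofList (rs.map k)).map
        (fun day => (day, ((rs.filter p).map k).contains day)) := by
  induction rs using List.reverseRecOn with
  | nil => rfl
  | append_singleton rs x ih =>
    set d := rs.foldl
        (fun (d : PySem.Dict B Bool) x => d.insert (k x) (p x || d.getD (k x) false))
        PySem.Dict.empty with hd
    set O : PySem.Set B := PySem.Set.ofList (rs.map k) with hO
    set F : List B := (rs.filter p).map k with hF
    have hkeys : d.keys = O := by
      rw [PySem.Dict.keys, ih, List.map_map]
      exact List.map_id' O
    have hnodup : d.keys.Nodup := by rw [hkeys]; exact PySem.Set.nodup_ofList _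
    have hF' : ((rs ++ [x]).filter p).map k = F ++ (if p x = true then [k x] else []) := by
      rw [List.filter_append]
      by_cases hp : p x = true <;> simp [hp, hF]
    have hO' : PySem.Set.ofList ((rs ++ [x]).map k) = PySem.Set.add O (k x) := by
      rw [List.map_append, List.map_cons, List.map_nil, PySem.Set.ofList_append_singleton, hO]
    have hFsub : ∀ day, day ∉ O → F.contains day = false := by
      intro day hm
      have hnm : day ∉ F := fun hmem =>
        hm (by rw [hO, PySem.Set.mem_ofList]; exact freq_subset p k rs day hmem)
      simpa using hnm
    have hFsame : ∀ day, day ≠ k x →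
        (F ++ (if p x = true then [k x] else [])).contains day = F.contains day := by
      intro day he
      by_cases hp : p x = true <;> simp [hp, he]
    rw [List.foldl_append, List.foldl_cons, List.foldl_nil, ← hd, hF', hO']
    by_cases hm : k x ∈ O
    · have hct : d.contains (k x) = true :=
        (PySem.Dict.contains_iff_mem_keys d (k x)).2 (by rw [hkeys]; exact hm)
      have hmem : ((k x), F.contains (k x)) ∈ d.items := by
        rw [ih]
        exact List.mem_map_of_mem hm
      have hgd : d.getD (k x) false = F.contains (k x) :=
        PySem.Dict.getD_of_mem_items d hmem hnodup false
      have hflag : (p x || d.getD (k x) false)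
          = (F ++ (if p x = true then [k x] else [])).contains (k x) := by
        rw [hgd]
        by_cases hp : p x = true <;> simp [hp]
      rw [PySem.Dict.items_insert, if_pos hct, PySem.Set.add_of_mem hm, ih,
        List.map_map]
      apply List.map_congr_left
      intro day hday
      by_cases he : day = k x
      · subst he
        simp only [Function.comp_apply, BEq.rfl, if_true]
        exact Prod.ext rfl hflag
      · have hne : ((day == k x) : Bool) = false := by simp [he]
        simp only [Function.comp_apply, hne, Bool.false_eq_true, if_false]
        rw [hFsame day he]
    · have hcf : d.contains (k x) = false := by
        rw [Bool.eq_false_iff]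
        intro hcc
        exact hm (hkeys ▸ (PySem.Dict.contains_iff_mem_keys d (k x)).1 hcc)
      have hgd : d.getD (k x) false = false :=
        PySem.Dict.getD_of_not_contains d false hcf
      have hflag : (p x || d.getD (k x) false)
          = (F ++ (if p x = true then [k x] else [])).contains (k x) := by
        have hnF : (k x) ∉ F := fun hmem =>
          hm (by rw [hO, PySem.Set.mem_ofList]; exact freq_subset p k rs _ hmem)
        rw [hgd]
        by_cases hp : p x = true <;> simp [hp, hnF]
      rw [PySem.Dict.items_insert, if_neg (by simp [hcf]), PySem.Set.add_of_not_mem hm,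
        List.map_append, ih]
      congr 1
      · apply List.map_congr_left
        intro day hday
        have he : day ≠ k x := fun h => hm (h ▸ hday)
        rw [hFsame day he]
      · simp [hflag]

theorem days_off_spec_aux (customer : String) (requests : List (List String)) :
    days_off customer requests = days_off_alt customer requests := by
  unfold days_off days_off_alt opened_days days_on
  dsimp only
  rw [grouping (fun line => line.contains customer) pvGet2 requests]
  rw [PySem.Set.ofList_ofList, PySem.Set.ofList_ofList]
  generalize hOF : PySem.Set.ofList (requests.map (fun line => pvGet2 line)) = O
  generalize hFF : (requests.filter (fun line => line.contains customer)).map (fun line => pvGet2 line) = F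
  -- A's loop is a filter over O; B's comprehension is the same filter
  have hA : O.foldl (fun r day => if !(PySem.Set.contains (PySem.Set.ofList F) day) then r ++ [day] else r) []
      = O.filter (fun day => !(PySem.Set.contains (PySem.Set.ofList F) day)) := by
    have := PySem.List.foldl_append_if
      (fun day => !(PySem.Set.contains (PySem.Set.ofList F) day)) (fun day => day) O []
    simpa [List.map_id'] using this
  rw [hA]
  have hB : ((O.map (fun day => (day, F.contains day))).filter (fun p => !p.2)).map (fun p => p.1)
      = O.filter (fun day => !(PySem.Set.contains (PySem.Set.ofList F) day)) := by
    rw [List.filter_map, List.map_map]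
    have hcong : O.filter ((fun p : String × Bool => !p.2) ∘ (fun day => (day, F.contains day)))
        = O.filter (fun day => !(PySem.Set.contains (PySem.Set.ofList F) day)) := by
      apply List.filter_congr
      intro day _
      simp only [Function.comp_apply, PySem.Set.contains_eq_listContains]
      congr 1
      by_cases h : day ∈ F
      · simp [h, (PySem.Set.mem_ofList F day).2 h]
      · have h2 : day ∉ PySem.Set.ofList F := fun hc => h ((PySem.Set.mem_ofList F day).1 hc)
        simp [h, h2]
    rw [hcong]
    exact List.map_id' _
  rw [hB]

-- ===== VERDICT (by name: the statement is the Claim_ definition above) =====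
theorem days_off_spec : Claim_equal_days_off := by
  intro customer requests _ _
  show _ = _
  exact days_off_spec_aux customer requests
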